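-- pv_equiv track=rewrite | github.com/Zynro/bathbot | modules/dragalia/models/constants.py | parse_coabs
-- ===== SOURCE A (Python) =====
-- d_emoji = {
--     "flame": "<:flame_:641010593205190657>",
--     "water": "<:water_:641010711073390594>",
--     "wind": "<:wind_:641008886307880961>",
--     "light": "<:light_:641008871317569597>",
--     "shadow": "<:shadow_:641008878774910986>",
--     "sword": "<:sword:641010676042825740>",
--     "blade": "<:blade_:641010564784586763>",
--     "dagger": "<:dagger_:641010584057544744>",
--     "axe": "<:axe_:641010556089663498>",
--     "lance": "<:lance_:641010603804065802>",
--     "bow": "<:bow_:641010576767582209>",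
--     "wand": "<:wand_:641010751607406623>",
--     "staff": "<:staff_:641010666148331551>",
--     "3*": "<:3_star:641018606972567582>",
--     "4*": "<:4_star:641018617147949076>",
--     "5*": "<:5_star:641018624991166497>",
-- }
--
-- COAB_DICT = {
--     "blade": "k",
--     "wand": "r",
--     "dagger": "d",
--     "bow": "b",
--     "none": "_",
--     "k": "k",
--     "r": "r",
--     "d": "d",
--     "b": "b",
-- }
--
-- coab_sort_key = ["k", "r", "d", "b"]
--
-- def coab_sort(coabs):
--     if "none" == coabs.lower():
--         return "_"
--     else:
--         return "".join(
--             sorted(coabs, key=lambda c_list: [coab_sort_key.index(c) for c in c_list])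
--         )
--
-- def parse_coabs(coab_input=None):
--     if not coab_input:
--         return "_"
--     coab_input = coab_input.lower()
--     if "none" in coab_input:
--         return "_"
--     else:
--         try:
--             coabs = coab_input.split(" ")
--             if coab_input in d_emoji.keys():
--                 coabs_result = COAB_DICT[coab_input]
--             elif len(coabs) > 1:
--                 coabs_result = "".join([COAB_DICT[coab] for coab in coabs])
--             else:
--                 coabs_result = "".join([COAB_DICT[coab] for coab in coabs[0]])
--             return coab_sort(coabs_result)
--         except KeyError:
--             return None
-- ===== SOURCE B (Python) =====
-- d_emoji = {
--     "flame": "<:flame_:641010593205190657>",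
--     "water": "<:water_:641010711073390594>",
--     "wind": "<:wind_:641008886307880961>",
--     "light": "<:light_:641008871317569597>",
--     "shadow": "<:shadow_:641008878774910986>",
--     "sword": "<:sword:641010676042825740>",
--     "blade": "<:blade_:641010564784586763>",
--     "dagger": "<:dagger_:641010584057544744>",
--     "axe": "<:axe_:641010556089663498>",
--     "lance": "<:lance_:641010603804065802>",
--     "bow": "<:bow_:641010576767582209>",
--     "wand": "<:wand_:641010751607406623>",
--     "staff": "<:staff_:641010666148331551>",
--     "3*": "<:3_star:641018606972567582>",
--     "4*": "<:4_star:641018617147949076>",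
--     "5*": "<:5_star:641018624991166497>",
-- }
--
-- COAB_DICT = {
--     "blade": "k",
--     "wand": "r",
--     "dagger": "d",
--     "bow": "b",
--     "none": "_",
--     "k": "k",
--     "r": "r",
--     "d": "d",
--     "b": "b",
-- }
--
-- coab_sort_key = ["k", "r", "d", "b"]
--
--
-- def parse_coabs(coab_input=None):
--     # Unified unit selection + explicit lookup loop + counting/bucket pass over the
--     # fixed alphabet instead of three comprehensions, try/except and a keyed sort().
--     if not coab_input:
--         return "_"
--     s = coab_input.lower()
--     if "none" in s:
--         return "_"
--     words = s.split(" ")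
--     if s in d_emoji:
--         units = [s]
--     elif len(words) > 1:
--         units = words
--     else:
--         units = list(words[0])
--     codes = []
--     for u in units:
--         code = COAB_DICT.get(u)
--         if code is None:
--             return None
--         codes.append(code)
--     return "".join(c * codes.count(c) for c in coab_sort_key)
-- ===== Notes on version B (the rewrite author's own statement) =====
-- stated objective: alternative
-- what changed: A's three per-branch comprehensions with try/except KeyError and a comparison sort keyed by coab_sort_key.index are replaced by one unified unit list, an explicit lookup loop with early None, and a counting/bucket pass over the fixed four-code alphabet that removes sorted() entirely.
import Mathlib
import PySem

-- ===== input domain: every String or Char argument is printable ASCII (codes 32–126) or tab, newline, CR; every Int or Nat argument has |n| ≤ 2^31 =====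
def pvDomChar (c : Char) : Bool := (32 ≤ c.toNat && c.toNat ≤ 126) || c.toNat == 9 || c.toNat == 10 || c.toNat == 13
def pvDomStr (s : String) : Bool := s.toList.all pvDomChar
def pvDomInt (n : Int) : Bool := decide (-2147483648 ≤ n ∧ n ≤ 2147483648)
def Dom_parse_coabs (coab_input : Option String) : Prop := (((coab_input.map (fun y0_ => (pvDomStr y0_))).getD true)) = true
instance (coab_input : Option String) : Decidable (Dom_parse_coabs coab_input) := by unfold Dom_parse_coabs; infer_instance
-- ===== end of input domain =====

-- B replaces A's three comprehensions + try/except + keyed sort() by one unified unit list,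
-- an explicit lookup loop with early None, and a counting/bucket pass over the fixed
-- alphabet "krdb" (objective: alternative / simpler decomposition; same cost).

-- ===== PORT A =====
def pvDEmoji : PySem.Dict String String := PySem.Dict.ofList
  [("flame", "<:flame_:641010593205190657>"),
   ("water", "<:water_:641010711073390594>"),
   ("wind", "<:wind_:641008886307880961>"),
   ("light", "<:light_:641008871317569597>"),
   ("shadow", "<:shadow_:641008878774910986>"),
   ("sword", "<:sword:641010676042825740>"),
   ("blade", "<:blade_:641010564784586763>"),
   ("dagger", "<:dagger_:641010584057544744>"),
   ("axe", "<:axe_:641010556089663498>"),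
   ("lance", "<:lance_:641010603804065802>"),
   ("bow", "<:bow_:641010576767582209>"),
   ("wand", "<:wand_:641010751607406623>"),
   ("staff", "<:staff_:641010666148331551>"),
   ("3*", "<:3_star:641018606972567582>"),
   ("4*", "<:4_star:641018617147949076>"),
   ("5*", "<:5_star:641018624991166497>")]

def pvCoabDict : PySem.Dict String String := PySem.Dict.ofList
  [("blade", "k"), ("wand", "r"), ("dagger", "d"), ("bow", "b"), ("none", "_"),
   ("k", "k"), ("r", "r"), ("d", "d"), ("b", "b")]

-- coab_sort_key.index(c); the .getD 0 default is where Python would raise ValueError,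
-- which is unreachable from parse_coabs (coab_sort only ever sees 'k','r','d','b')
def pvKey (c : Char) : Nat := (PySem.List.index? ['k', 'r', 'd', 'b'] c).getD 0

-- coab_sort: the early 'none' check, then ''.join(sorted(coabs, key=index))
def coab_sortA (s : String) : String :=
  if PySem.Str.lower s = "none" then "_"
  else String.ofList (PySem.List.sorted s.toList (fun c => pvKey c) false)

def parse_coabs (coab_input : Option String) : Option String :=
  match coab_input with
  | none => some "_"
  | some s0 =>
    if s0.toList = [] then some "_"
    else
      let cs := PySem.Chars.lower s0.toList
      if PySem.Chars.isIn "none".toList cs then some "_"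
      else
        let coabs := PySem.Chars.splitOn cs [' ']
        let res : Option String :=
          if pvDEmoji.contains (String.ofList cs) then
            pvCoabDict.get? (String.ofList cs)
          else if 1 < coabs.length then
            -- "".join([COAB_DICT[coab] for coab in coabs]); a missing key (KeyError → None) is 'none' of mapM
            (coabs.mapM (fun w => pvCoabDict.get? (String.ofList w))).map (fun codes => PySem.Str.join "" codes)
          else
            -- "".join([COAB_DICT[coab] for coab in coabs[0]])
            ((coabs.headD []).mapM (fun c => pvCoabDict.get? (String.ofList [c]))).map (fun codes => PySem.Str.join "" codes)
        match res with
        | none => none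
        | some r => some (coab_sortA r)

-- ===== PORT B =====
-- the lookup loop: codes.append(COAB_DICT.get(u)), early return None on a miss
def pvCollect : List (List Char) → List String → Option (List String)
  | [], codes => some codes
  | u :: t, codes =>
    match pvCoabDict.get? (String.ofList u) with
    | none => none
    | some code => pvCollect t (codes ++ [code])

-- "".join(c * codes.count(c) for c in coab_sort_key)
def pvBucket (codes : List String) : List Char :=
  ['k', 'r', 'd', 'b'].flatMap (fun c => List.replicate (codes.count (String.ofList [c])) c)

def parse_coabs_alt (coab_input : Option String) : Option String :=
  match coab_input with
  | none => some "_"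
  | some s0 =>
    if s0.toList = [] then some "_"
    else
      let cs := PySem.Chars.lower s0.toList
      if PySem.Chars.isIn "none".toList cs then some "_"
      else
        let words := PySem.Chars.splitOn cs [' ']
        let units : List (List Char) :=
          if pvDEmoji.contains (String.ofList cs) then [cs]
          else if 1 < words.length then words
          else (words.headD []).map (fun c => [c])
        match pvCollect units [] with
        | none => none
        | some codes => some (String.ofList (pvBucket codes))

-- ===== PRECONDITION & SPEC =====
def Spec_parse_coabs (coab_input : Option String) (out : Option String) : Prop := out = parse_coabs_alt coab_input
instance (coab_input : Option String) (out : Option String) : Decidable (Spec_parse_coabs coab_input out) := by unfold Spec_parse_coabs; infer_instance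

-- ===== CLAIM (what is proved, stated in full; the proofs are below) =====
def Claim_equal_parse_coabs : Prop := ∀ (coab_input : Option String), Dom_parse_coabs coab_input → Spec_parse_coabs coab_input (parse_coabs coab_input)

-- ===== LEMMAS AND PROOFS =====

theorem pv_splitOn_go_infix (sep : List Char) (cs : List Char) :
    ∀ (fuel : Nat) (l cur : List Char) (acc : List (List Char)),
      (∀ p ∈ acc, p <:+: cs) → (cur.reverse ++ l <:+: cs) →
      ∀ w ∈ PySem.Chars.splitOn.go sep fuel l cur acc, w <:+: cs := by
  intro fuel
  induction fuel with
  | zero =>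
    intro l cur acc hacc hcur w hw
    simp [PySem.Chars.splitOn.go] at hw
    rcases hw with h | h
    · exact hacc _ h
    · exact h ▸ hcur
  | succ fuel ih =>
    intro l cur acc hacc hcur w hw
    cases l with
    | nil =>
      simp [PySem.Chars.splitOn.go] at hw
      rcases hw with h | h
      · exact hacc _ h
      · subst h; simpa using hcur
    | cons c rest =>
      rw [PySem.Chars.splitOn.go] at hw
      by_cases hp : sep.isPrefixOf (c :: rest) = true
      · rw [if_pos hp] at hw
        refine ih _ _ _ ?_ ?_ w hw
        · intro p hp'
          rcases List.mem_cons.mp hp' with h | h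
          · subst h; exact (List.prefix_append _ _).isInfix.trans hcur
          · exact hacc _ h
        · simpa using ((List.drop_suffix _ _).trans (List.suffix_append _ _)).isInfix.trans hcur
      · rw [if_neg hp] at hw
        refine ih _ _ _ hacc ?_ w hw
        simpa using hcur

theorem pv_mem_splitOn_infix (cs : List Char) (w : List Char)
    (h : w ∈ PySem.Chars.splitOn cs [' ']) : w <:+: cs := by
  have := pv_splitOn_go_infix [' '] cs (cs.length + 1) cs [] []
    (by simp) (by simp)
  exact this w h

theorem pv_collect_eq (l : List (List Char)) :
    ∀ (acc : List String),
    pvCollect l acc = (l.mapM (fun u => pvCoabDict.get? (String.ofList u))).map (fun codes => acc ++ codes) := by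
  induction l with
  | nil => intro acc; simp [pvCollect]
  | cons u t ih =>
    intro acc
    simp only [pvCollect, List.mapM_cons]
    cases h : pvCoabDict.get? (String.ofList u) with
    | none => simp
    | some code =>
      simp only []
      rw [ih]
      cases ht : List.mapM (fun u => pvCoabDict.get? (String.ofList u)) t <;> simp

theorem pv_mapM_mem {α β : Type} (f : α → Option β) :
    ∀ (l : List α) (ys : List β), l.mapM f = some ys → ∀ y ∈ ys, ∃ x ∈ l, f x = some y := by
  intro l
  induction l with
  | nil => intro ys h y hy; simp at h; subst h; simp at hy
  | cons x t ih =>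
    intro ys h y hy
    simp only [List.mapM_cons] at h
    cases hx : f x with
    | none => simp [hx] at h
    | some b =>
      simp only [hx] at h
      cases ht : t.mapM f with
      | none => simp [ht] at h
      | some bs =>
        simp [ht] at h
        subst h
        rcases List.mem_cons.mp hy with h | h
        · exact ⟨x, by simp, by simp [hx, h]⟩
        · obtain ⟨x', hx', hfx'⟩ := ih bs ht y h
          exact ⟨x', by simp [hx'], hfx'⟩

theorem pv_get?_coab_cases (x v : String) (h : pvCoabDict.get? x = some v) :
    v ∈ (["k", "r", "d", "b"] : List String) ∨ (v = "_" ∧ x = "none") := by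
  have hd : pvCoabDict = PySem.Dict.mk
      [("blade", "k"), ("wand", "r"), ("dagger", "d"), ("bow", "b"), ("none", "_"),
       ("k", "k"), ("r", "r"), ("d", "d"), ("b", "b")] := by rfl
  rw [hd] at h
  simp only [PySem.Dict.get?_mk_cons, beq_iff_eq] at h
  split_ifs at h <;> simp_all [PySem.Dict.get?]

theorem pv_join_nil (parts : List (List Char)) : PySem.Chars.join [] parts = parts.flatten := by
  simp only [PySem.Chars.join, List.intercalate]
  induction parts with
  | nil => rfl
  | cons x t ih =>
    cases t with
    | nil => simp
    | cons y t' =>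
      rw [List.intersperse_cons₂] at *
      simp only [List.flatten_cons] at *
      simp [ih]
theorem pv_ofList_single (s : String) (a : Char) (hs : s.toList = [a]) :
    s = String.ofList [a] := by
  have h2 : String.ofList s.toList = s := String.ofList_toList
  rw [hs] at h2
  exact h2.symm
theorem pv_join_counts (codes : List String)
    (hS : ∀ s ∈ codes, s ∈ (["k", "r", "d", "b"] : List String)) :
    (∀ ch ∈ (PySem.Str.join "" codes).toList, ch ∈ (['k', 'r', 'd', 'b'] : List Char)) ∧
    (∀ ch : Char, ((PySem.Str.join "" codes).toList.count ch) = codes.count (String.ofList [ch])) := by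
  have key : ∀ (cl : List String), (∀ s ∈ cl, s ∈ (["k", "r", "d", "b"] : List String)) →
      (∀ ch ∈ (cl.map String.toList).flatten, ch ∈ (['k', 'r', 'd', 'b'] : List Char)) ∧
      (∀ ch : Char, ((cl.map String.toList).flatten.count ch) = cl.count (String.ofList [ch])) := by
    intro cl
    induction cl with
    | nil => intro _; constructor <;> simp
    | cons s t ih =>
      intro hS
      have hs : s ∈ (["k", "r", "d", "b"] : List String) := hS s (by simp)
      have ht := ih (fun x hx => hS x (by simp [hx]))
      have hsl : ∃ a, s.toList = [a] ∧ a ∈ (['k', 'r', 'd', 'b'] : List Char) := by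
        simp only [List.mem_cons, List.not_mem_nil, or_false] at hs
        rcases hs with h | h | h | h
        · exact ⟨'k', by subst h; exact ⟨by decide, by decide⟩⟩
        · exact ⟨'r', by subst h; exact ⟨by decide, by decide⟩⟩
        · exact ⟨'d', by subst h; exact ⟨by decide, by decide⟩⟩
        · exact ⟨'b', by subst h; exact ⟨by decide, by decide⟩⟩
      obtain ⟨a, ha, haK⟩ := hsl
      constructor
      · intro ch hch
        simp only [List.map_cons, List.flatten_cons, ha, List.mem_append] at hch
        rcases hch with h | h
        · simp at h; subst h; exact haK
        · exact ht.1 ch h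
      · intro ch
        simp only [List.map_cons, List.flatten_cons, ha, List.count_cons, List.singleton_append,
          List.count_cons]
        rw [ht.2 ch, pv_ofList_single s a ha]
        by_cases h : a = ch
        · simp [h]
        · have hne : ¬ (String.ofList [a] = String.ofList [ch]) := fun hh => h (by simpa using String.ofList_inj.mp hh)
          simp [h, hne]
  have hb : (PySem.Str.join "" codes).toList = (codes.map String.toList).flatten := by
    rw [PySem.Str.toList_join]
    simpa using pv_join_nil (codes.map String.toList)
  rw [hb]
  exact key codes hS


theorem pv_insertBy_skip (before : Char → Char → Bool) (x : Char) :
    ∀ (ys rest : List Char), (∀ y ∈ ys, before x y = false) →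
      PySem.List.insertBy before x (ys ++ rest) = ys ++ PySem.List.insertBy before x rest := by
  intro ys
  induction ys with
  | nil => intro rest _; rfl
  | cons y t ih =>
    intro rest h
    have hy : before x y = false := h y (by simp)
    simp only [List.cons_append]
    rw [show PySem.List.insertBy before x (y :: (t ++ rest)) =
      if before x y then x :: y :: (t ++ rest) else y :: PySem.List.insertBy before x (t ++ rest) from rfl, hy]
    simp only [Bool.false_eq_true, if_false]
    rw [ih rest (fun z hz => h z (by simp [hz]))]

theorem pv_insertBy_front (before : Char → Char → Bool) (x : Char)
    (rest : List Char) (h : ∀ z ∈ rest, before x z = true) :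
    PySem.List.insertBy before x rest = x :: rest := by
  cases rest with
  | nil => rfl
  | cons z t => simp [PySem.List.insertBy, h z (by simp)]

def pvCBucket (l : List Char) : List Char :=
  ['k', 'r', 'd', 'b'].flatMap (fun c => List.replicate (l.count c) c)

theorem pv_insert_bucket (c : Char) (hc : c ∈ (['k', 'r', 'd', 'b'] : List Char)) (l : List Char) :
    PySem.List.insertBy (fun a b => decide (pvKey a < pvKey b)) c (pvCBucket l)
      = pvCBucket (l ++ [c]) := by
  have hrep : ∀ (x y : Char) (n : Nat), (decide (pvKey x < pvKey y) = false) →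
      ∀ z ∈ List.replicate n y, decide (pvKey x < pvKey z) = false := by
    intro x y n h z hz
    rw [List.eq_of_mem_replicate hz]; exact h
  simp only [pvCBucket, List.flatMap_cons, List.flatMap_nil, List.append_nil]
  fin_cases hc
  · -- c = 'k'
    rw [pv_insertBy_skip _ _ _ _ (hrep _ 'k' _ (by decide)),
        pv_insertBy_front _ _ _ ?_]
    · simp [List.count_append, List.replicate_succ']
    · intro z hz
      simp only [List.mem_append, List.mem_replicate] at hz
      rcases hz with ⟨_, h⟩ | ⟨_, h⟩ | ⟨_, h⟩ <;> rw [h] <;> decide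
  · -- c = 'r'
    rw [pv_insertBy_skip _ _ _ _ (hrep _ 'k' _ (by decide)),
        pv_insertBy_skip _ _ _ _ (hrep _ 'r' _ (by decide)),
        pv_insertBy_front _ _ _ ?_]
    · simp [List.count_append, List.replicate_succ']
    · intro z hz
      simp only [List.mem_append, List.mem_replicate] at hz
      rcases hz with ⟨_, h⟩ | ⟨_, h⟩ <;> rw [h] <;> decide
  · -- c = 'd'
    rw [pv_insertBy_skip _ _ _ _ (hrep _ 'k' _ (by decide)),
        pv_insertBy_skip _ _ _ _ (hrep _ 'r' _ (by decide)),
        pv_insertBy_skip _ _ _ _ (hrep _ 'd' _ (by decide)),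
        pv_insertBy_front _ _ _ ?_]
    · simp [List.count_append, List.replicate_succ']
    · intro z hz
      simp only [List.mem_replicate] at hz
      rw [hz.2]; decide
  · -- c = 'b'
    rw [pv_insertBy_skip _ _ _ _ (hrep _ 'k' _ (by decide)),
        pv_insertBy_skip _ _ _ _ (hrep _ 'r' _ (by decide)),
        pv_insertBy_skip _ _ _ _ (hrep _ 'd' _ (by decide))]
    have hlast : PySem.List.insertBy (fun a b => decide (pvKey a < pvKey b)) 'b'
        (List.replicate (List.count 'b' l) 'b') = List.replicate (List.count 'b' l) 'b' ++ ['b'] := by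
      have h2 := pv_insertBy_skip (fun a b => decide (pvKey a < pvKey b)) 'b'
        (List.replicate (List.count 'b' l) 'b') [] (hrep _ 'b' _ (by decide))
      simpa using h2
    rw [hlast]
    simp [List.count_append, List.replicate_succ']

theorem pv_foldl_insert_bucket :
    ∀ (l m : List Char), (∀ c ∈ l, c ∈ (['k', 'r', 'd', 'b'] : List Char)) →
      l.foldl (fun acc x => PySem.List.insertBy (fun a b => decide (pvKey a < pvKey b)) x acc)
        (pvCBucket m) = pvCBucket (m ++ l) := by
  intro l
  induction l with
  | nil => intro m _; simp
  | cons c t ih =>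
    intro m h
    simp only [List.foldl_cons]
    rw [pv_insert_bucket c (h c (by simp)) m, ih (m ++ [c]) (fun x hx => h x (by simp [hx]))]
    simp

theorem pv_sorted_eq_bucket (l : List Char)
    (hK : ∀ c ∈ l, c ∈ (['k', 'r', 'd', 'b'] : List Char)) :
    PySem.List.sorted l (fun c => pvKey c) false =
      ['k', 'r', 'd', 'b'].flatMap (fun c => List.replicate (l.count c) c) := by
  rw [PySem.List.sorted_eq_foldl_insertBy]
  have h0 : ([] : List Char) = pvCBucket [] := by decide
  rw [h0, pv_foldl_insert_bucket l [] hK]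
  simp [pvCBucket]

theorem pv_ofList_eq_iff (a : List Char) (t : String) : String.ofList a = t ↔ a = t.toList := by
  constructor
  · intro h; have := congrArg String.toList h; simpa using this
  · intro h; subst h; exact String.ofList_toList

theorem pv_lower_ne_none (l : List Char)
    (hK : ∀ c ∈ l, c ∈ (['k', 'r', 'd', 'b'] : List Char)) :
    PySem.Chars.lower l ≠ "none".toList := by
  intro h
  cases l with
  | nil => simp [PySem.Chars.lower] at h
  | cons a t =>
    have ha : PySem.Chars.lowerChar a = 'n' := by
      simp only [PySem.Chars.lower, List.map_cons] at h
      have : "none".toList = 'n' :: ['o','n','e'] := by decide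
      rw [this] at h
      exact (List.cons.injEq _ _ _ _ ▸ h).1
    have haK := hK a (by simp)
    simp only [List.mem_cons, List.not_mem_nil, or_false] at haK
    rcases haK with h | h | h | h <;> subst h <;> exact absurd ha (by decide)

theorem pv_join_single (v : String) : PySem.Str.join "" [v] = v := by
  apply String.toList_inj.mp
  rw [PySem.Str.toList_join]
  simp

-- the common tail: coab_sort of the joined codes is the bucket pass over the codes
theorem pv_tail_eq (codes : List String)
    (hS : ∀ s ∈ codes, s ∈ (["k", "r", "d", "b"] : List String)) :
    coab_sortA (PySem.Str.join "" codes) = String.ofList (pvBucket codes) := by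
  obtain ⟨hKl, hcnt⟩ := pv_join_counts codes hS
  have hne : ¬ (PySem.Str.lower (PySem.Str.join "" codes) = "none") := by
    intro h
    have h2 := congrArg String.toList h
    rw [PySem.Str.toList_lower] at h2
    exact pv_lower_ne_none _ hKl h2
  rw [coab_sortA, if_neg hne]
  congr 1
  rw [pv_sorted_eq_bucket _ hKl]
  simp only [pvBucket, List.flatMap_cons, List.flatMap_nil, List.append_nil]
  rw [hcnt 'k', hcnt 'r', hcnt 'd', hcnt 'b']

theorem pv_glue (units : List (List Char))
    (hK : ∀ u ∈ units, ∀ v, pvCoabDict.get? (String.ofList u) = some v → v ∈ (["k", "r", "d", "b"] : List String)) :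
    (match (units.mapM (fun u => pvCoabDict.get? (String.ofList u))).map (fun codes => PySem.Str.join "" codes) with
     | none => none
     | some r => some (coab_sortA r))
    = (match pvCollect units [] with
       | none => none
       | some codes => some (String.ofList (pvBucket codes))) := by
  rw [pv_collect_eq units []]
  cases hm : units.mapM (fun u => pvCoabDict.get? (String.ofList u)) with
  | none => simp
  | some codes =>
    simp only [Option.map_some, List.nil_append]
    have hS : ∀ s ∈ codes, s ∈ (["k", "r", "d", "b"] : List String) := by
      intro s hs
      obtain ⟨u, hu, hget⟩ := pv_mapM_mem _ units codes hm s hs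
      exact hK u hu s hget
    rw [pv_tail_eq codes hS]

-- ===== VERDICT (by name: the statement is the Claim_ definition above) =====
theorem pv_mapM_map_single (l : List Char) (f : List Char → Option String) :
    (l.map (fun c => [c])).mapM f = l.mapM (fun c => f [c]) := by
  induction l with
  | nil => rfl
  | cons c t ih => simp only [List.map_cons, List.mapM_cons, ih]

theorem parse_coabs_spec : Claim_equal_parse_coabs := by
  intro coab_input _
  unfold Spec_parse_coabs
  cases coab_input with
  | none => rfl
  | some s0 =>
    simp only [parse_coabs, parse_coabs_alt]
    by_cases h0 : s0.toList = []
    · simp [h0]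
    · simp only [h0, if_false]
      by_cases hno : PySem.Chars.isIn "none".toList (PySem.Chars.lower s0.toList) = true
      · simp only [hno, if_true]
      · have hno' : PySem.Chars.isIn "none".toList (PySem.Chars.lower s0.toList) = false :=
          Bool.eq_false_iff.mpr hno
        simp only [hno', Bool.false_eq_true, if_false]
        have hnotnone : ∀ w : List Char, w <:+: (PySem.Chars.lower s0.toList) → ∀ v,
            pvCoabDict.get? (String.ofList w) = some v → v ∈ (["k", "r", "d", "b"] : List String) := by
          intro w hw v hv
          rcases pv_get?_coab_cases _ _ hv with h | ⟨_, hx⟩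
          · exact h
          · exfalso
            rw [pv_ofList_eq_iff] at hx
            subst hx
            exact hno ((PySem.Chars.isIn_iff_infix _ _).mpr hw)
        by_cases hd : pvDEmoji.contains (String.ofList (PySem.Chars.lower s0.toList)) = true
        · simp only [hd, if_true]
          cases hg : pvCoabDict.get? (String.ofList (PySem.Chars.lower s0.toList)) with
          | none => simp [pvCollect, hg]
          | some v =>
            have hv := hnotnone _ (List.infix_refl _) v hg
            have hcol : pvCollect [PySem.Chars.lower s0.toList] [] = some [v] := by
              simp [pvCollect, hg]
            rw [hcol]
            have ht := pv_tail_eq [v] (by intro s hs; simp at hs; subst hs; exact hv)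
            rw [pv_join_single] at ht
            simp only [ht]
        · simp only [hd, Bool.false_eq_true, if_false]
          by_cases hl : 1 < (PySem.Chars.splitOn (PySem.Chars.lower s0.toList) [' ']).length
          · simp only [hl, if_true]
            exact pv_glue _ (fun u hu v hv => hnotnone u (pv_mem_splitOn_infix _ u hu) v hv)
          · simp only [hl, if_false]
            rw [← pv_mapM_map_single ((PySem.Chars.splitOn (PySem.Chars.lower s0.toList) [' ']).headD [])
              (fun u => pvCoabDict.get? (String.ofList u))]
            refine pv_glue _ ?_
            intro u hu v hv
            simp only [List.mem_map] at hu
            obtain ⟨c, _, hc⟩ := hu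
            subst hc
            rcases pv_get?_coab_cases _ _ hv with h | ⟨_, hx⟩
            · exact h
            · exfalso
              rw [pv_ofList_eq_iff] at hx
              have hlen := congrArg List.length hx
              have h4 : ("none".toList).length = 4 := by decide
              rw [h4] at hlen
              simp at hlen
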